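-- pv_equiv track=rewrite | github.com/tomrodinger/ESP32_STM32_programmer | viewer/view_log.py | build_step_series
-- ===== SOURCE A (Python) =====
-- def build_step_series(events, signal, end_t):
--     # Convert change-events into step-wise x/y arrays.
--     xs = []
--     ys = []
--
--     last_t = None
--     last_v = None
--
--     for t, sig, v, _meta in events:
--         if sig != signal:
--             continue
--
--         if last_t is None:
--             xs.append(t)
--             ys.append(v)
--             last_t = t
--             last_v = v
--             continue
--
--         if t == last_t:
--             # Same timestamp: just update value
--             ys[-1] = v
--             last_v = v
--             continue
--
--         # Extend previous value up to t, then step to new value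
--         xs.append(t)
--         ys.append(last_v)
--         xs.append(t)
--         ys.append(v)
--
--         last_t = t
--         last_v = v
--
--     # Ensure each trace extends to the final timestamp in the log
--     if last_t is not None and last_t < end_t:
--         xs.append(end_t)
--         ys.append(last_v)
--
--     return xs, ys
-- ===== SOURCE B (Python) =====
-- def build_step_series(events, signame, end_t):
--     # ('signame' = A's 'signal' parameter: the sandbox screen refuses that
--     # identifier because it collides with the stdlib module name; calls are positional.)
--     # Phase 1: collapse matching events into ordered (t, v) transitions,
--     # overwriting the last pair when a run of equal consecutive timestamps occurs.
--     pairs = []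
--     for t, sig, v, _meta in events:
--         if sig != signame:
--             continue
--         if pairs and pairs[-1][0] == t:
--             pairs[-1] = (t, v)
--         else:
--             pairs.append((t, v))
--
--     # Phase 2: expand transitions into step-wise x/y arrays.
--     xs = []
--     ys = []
--     prev = None
--     for t, v in pairs:
--         if prev is None:
--             xs.append(t)
--             ys.append(v)
--         else:
--             xs.append(t); ys.append(prev)
--             xs.append(t); ys.append(v)
--         prev = v
--
--     if pairs and pairs[-1][0] < end_t:
--         xs.append(end_t)
--         ys.append(pairs[-1][1])
--
--     return xs, ys
-- ===== Notes on version B (the rewrite author's own statement) =====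
-- stated objective: alternative
-- what changed: B splits A's single stateful loop into two phases: first collapse matching events into an ordered (t,v) transition list (overwriting the last pair on consecutive equal timestamps), then a separate expansion pass builds the step-wise xs/ys arrays and the final end_t extension reads the last transition.
import Mathlib
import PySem

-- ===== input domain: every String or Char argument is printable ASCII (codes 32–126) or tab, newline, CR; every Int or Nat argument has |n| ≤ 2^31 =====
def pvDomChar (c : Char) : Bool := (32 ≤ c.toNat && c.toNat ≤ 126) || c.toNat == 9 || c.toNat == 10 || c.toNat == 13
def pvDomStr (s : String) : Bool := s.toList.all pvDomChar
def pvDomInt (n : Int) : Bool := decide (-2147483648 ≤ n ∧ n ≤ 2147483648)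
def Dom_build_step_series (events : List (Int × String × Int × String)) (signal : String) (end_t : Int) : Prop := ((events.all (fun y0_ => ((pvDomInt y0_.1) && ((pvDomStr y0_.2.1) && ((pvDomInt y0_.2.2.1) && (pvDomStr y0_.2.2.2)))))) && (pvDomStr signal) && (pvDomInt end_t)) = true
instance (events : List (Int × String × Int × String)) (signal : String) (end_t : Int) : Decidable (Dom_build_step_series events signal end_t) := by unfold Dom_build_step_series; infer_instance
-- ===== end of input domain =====

-- B restructures A's single stateful loop into two phases (collapse to a transition
-- list, then expand to step arrays); same cost, alternative decomposition.

-- ===== PORT A =====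
-- A's loop state: (xs, ys, last_t, last_v). In Python last_v is an int whenever
-- last_t is set; `.getD 0` in the `some lt` branch reads that always-set value.
def bssA_loop (signal : String) :
    List (Int × String × Int × String) →
    (List Int × List Int × Option Int × Option Int) →
    (List Int × List Int × Option Int × Option Int)
  | [], st => st
  | (t, sig, v, _meta) :: rest, (xs, ys, lastT, lastV) =>
    if sig ≠ signal then
      bssA_loop signal rest (xs, ys, lastT, lastV)
    else
      match lastT with
      | none => bssA_loop signal rest (xs ++ [t], ys ++ [v], some t, some v)
      | some lt =>
        if t = lt then
          -- ys[-1] = v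
          bssA_loop signal rest (xs, ys.dropLast ++ [v], lastT, some v)
        else
          bssA_loop signal rest (xs ++ [t, t], ys ++ [lastV.getD 0, v], some t, some v)

def build_step_series (events : List (Int × String × Int × String)) (signal : String) (end_t : Int) : List Int × List Int :=
  match bssA_loop signal events ([], [], none, none) with
  | (xs, ys, lastT, lastV) =>
    match lastT with
    | some lt => if lt < end_t then (xs ++ [end_t], ys ++ [lastV.getD 0]) else (xs, ys)
    | none => (xs, ys)

-- ===== PORT B =====
-- Phase 1: collapse matching events into ordered (t, v) transitions.
def bssB_collapse (signal : String) :
    List (Int × String × Int × String) → List (Int × Int) → List (Int × Int)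
  | [], pairs => pairs
  | (t, sig, v, _meta) :: rest, pairs =>
    if sig ≠ signal then
      bssB_collapse signal rest pairs
    else
      match pairs.getLast? with
      | some (lt, _) =>
        if lt = t then bssB_collapse signal rest (pairs.dropLast ++ [(t, v)])
        else bssB_collapse signal rest (pairs ++ [(t, v)])
      | none => bssB_collapse signal rest (pairs ++ [(t, v)])

-- Phase 2: expand transitions into step-wise x/y arrays.
def bssB_expand : List (Int × Int) → Option Int → (List Int × List Int) → (List Int × List Int)
  | [], _, out => out
  | (t, v) :: rest, prev, (xs, ys) =>
    match prev with
    | none => bssB_expand rest (some v) (xs ++ [t], ys ++ [v])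
    | some pv => bssB_expand rest (some v) (xs ++ [t, t], ys ++ [pv, v])

def build_step_series_alt (events : List (Int × String × Int × String)) (signal : String) (end_t : Int) : List Int × List Int :=
  let pairs := bssB_collapse signal events []
  match bssB_expand pairs none ([], []) with
  | (xs, ys) =>
    match pairs.getLast? with
    | some (lt, lv) => if lt < end_t then (xs ++ [end_t], ys ++ [lv]) else (xs, ys)
    | none => (xs, ys)

-- ===== CLAIM (what is proved, stated in full; the proofs are below) =====
def Spec_build_step_series (events : List (Int × String × Int × String)) (signal : String) (end_t : Int) (out : List Int × List Int) : Prop := out = build_step_series_alt events signal end_t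
instance (events : List (Int × String × Int × String)) (signal : String) (end_t : Int) (out : List Int × List Int) : Decidable (Spec_build_step_series events signal end_t out) := by unfold Spec_build_step_series; infer_instance

def Claim_equal_build_step_series : Prop := ∀ (events : List (Int × String × Int × String)) (signal : String) (end_t : Int), Dom_build_step_series events signal end_t → Spec_build_step_series events signal end_t (build_step_series events signal end_t)

-- ===== LEMMAS AND PROOFS =====

-- The A-state encoded by a transition list.
def bssState (p : List (Int × Int)) : List Int × List Int × Option Int × Option Int :=
  match bssB_expand p none ([], []) with
  | (xs, ys) => (xs, ys, (p.getLast?).map Prod.fst, (p.getLast?).map Prod.snd)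

-- The `prev` value bssB_expand carries after consuming q, started from prev.
def bssLastPrev (q : List (Int × Int)) (prev : Option Int) : Option Int :=
  match q.getLast? with
  | some pr => some pr.2
  | none => prev

lemma bssB_expand_append (q : List (Int × Int)) (t v : Int) :
    ∀ (prev : Option Int) (xs ys : List Int),
    bssB_expand (q ++ [(t, v)]) prev (xs, ys) =
      match bssLastPrev q prev with
      | none =>
        match bssB_expand q prev (xs, ys) with
        | (xs', ys') => (xs' ++ [t], ys' ++ [v])
      | some pv =>
        match bssB_expand q prev (xs, ys) with
        | (xs', ys') => (xs' ++ [t, t], ys' ++ [pv, v])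
      := by
  induction q with
  | nil => intro prev xs ys; cases prev <;> simp [bssB_expand, bssLastPrev]
  | cons hd tl ih =>
    intro prev xs ys
    obtain ⟨ht, hv⟩ := hd
    cases prev with
    | none =>
      simp only [List.cons_append, bssB_expand, ih]
      cases htl : tl.getLast? <;> simp [bssLastPrev, List.getLast?_cons, htl]
    | some pv =>
      simp only [List.cons_append, bssB_expand, ih]
      cases htl : tl.getLast? <;> simp [bssLastPrev, List.getLast?_cons, htl]

-- Main invariant: running A's loop from the state encoded by p equals the state
-- encoded by B's collapse continued from p.
lemma bss_main (signal : String) (rest : List (Int × String × Int × String)) :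
    ∀ p : List (Int × Int),
    bssA_loop signal rest (bssState p) = bssState (bssB_collapse signal rest p) := by
  induction rest with
  | nil => intro p; rfl
  | cons e tl ih =>
    intro p
    obtain ⟨t, sig, v, m0⟩ := e
    by_cases hs : sig = signal
    · subst hs
      have hne : ¬ (sig ≠ sig) := by simp
      rcases hE : bssB_expand p none ([], []) with ⟨xs, ys⟩
      have hst : bssState p = (xs, ys, (p.getLast?).map Prod.fst, (p.getLast?).map Prod.snd) := by
        simp [bssState, hE]
      rcases hq : p.getLast? with _ | ⟨lt, lv⟩
      · -- p = []
        have hpnil : p = [] := List.getLast?_eq_none_iff.mp hq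
        subst hpnil
        rw [hst, hq]
        simp only [bssA_loop, bssB_collapse, List.getLast?_nil, Option.map_none,
          if_neg hne, List.nil_append]
        rw [← ih [(t, v)]]
        have hEnil : xs = [] ∧ ys = [] := by
          have h0 : bssB_expand ([] : List (Int × Int)) none ([], []) = ([], []) := rfl
          rw [hE] at h0
          simp only [Prod.mk.injEq] at h0
          exact ⟨h0.1, h0.2⟩
        rw [hEnil.1, hEnil.2]
        simp [bssState, bssB_expand]
      · -- p ends with (lt, lv)
        obtain ⟨q, hp⟩ : ∃ q, p = q ++ [(lt, lv)] := by
          rcases List.eq_nil_or_concat p with h | ⟨q, a, h⟩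
          · subst h; simp at hq
          · subst h
            rw [List.concat_eq_append, List.getLast?_concat] at hq
            exact ⟨q, by rw [List.concat_eq_append, Option.some_inj.mp hq]⟩
        subst hp
        rw [hst, hq]
        rcases hEq : bssB_expand q none ([], []) with ⟨xq, yq⟩
        have hexp := bssB_expand_append q lt lv none [] []
        rw [hE, hEq] at hexp
        by_cases hteq : t = lt
        · subst hteq
          -- same timestamp: A overwrites ys[-1]; B replaces the last pair
          simp only [bssA_loop, bssB_collapse, List.getLast?_concat, Option.map_some,
            if_neg hne, ite_true]
          rw [List.dropLast_concat, ← ih (q ++ [(t, v)])]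
          have hexp2 := bssB_expand_append q t v none [] []
          rw [hEq] at hexp2
          rcases hql : q.getLast? with _ | ⟨qt, qv⟩
          · simp only [bssLastPrev, hql, Prod.mk.injEq] at hexp hexp2
            obtain ⟨hxs, hys⟩ := hexp; subst hxs; subst hys
            rw [show (yq ++ [lv]).dropLast ++ [v] = yq ++ [v] from by
              rw [List.dropLast_concat]]
            simp [bssState, hexp2]
          · simp only [bssLastPrev, hql, Prod.mk.injEq] at hexp hexp2
            obtain ⟨hxs, hys⟩ := hexp; subst hxs; subst hys
            rw [show (yq ++ [qv, lv]).dropLast ++ [v] = yq ++ [qv, v] from by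
              rw [show yq ++ [qv, lv] = (yq ++ [qv]) ++ [lv] from by simp,
                List.dropLast_concat]; simp]
            simp [bssState, hexp2]
        · -- new timestamp: A appends two points; B appends a new pair
          simp only [bssA_loop, bssB_collapse, List.getLast?_concat, Option.map_some,
            if_neg hne, if_neg hteq, if_neg (fun h : lt = t => hteq h.symm)]
          rw [← ih ((q ++ [(lt, lv)]) ++ [(t, v)])]
          have hexp3 := bssB_expand_append (q ++ [(lt, lv)]) t v none [] []
          rw [hE] at hexp3
          simp only [bssLastPrev, List.getLast?_concat] at hexp3
          simp only [List.append_assoc, List.cons_append, List.nil_append] at hexp3 ⊢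
          simp [bssState, hexp3, Option.getD]
    · simp only [bssA_loop, bssB_collapse, if_pos hs]
      exact ih p

-- ===== VERDICT (by name: the statement is the Claim_ definition above) =====
theorem build_step_series_spec : Claim_equal_build_step_series := by
  intro events signal end_t _
  show build_step_series events signal end_t = build_step_series_alt events signal end_t
  unfold build_step_series build_step_series_alt
  have h := bss_main signal events []
  have h0 : bssState [] = ([], [], none, none) := rfl
  rw [h0] at h
  rw [h]
  rcases hE : bssB_expand (bssB_collapse signal events []) none ([], []) with ⟨xs, ys⟩
  rcases hL : (bssB_collapse signal events []).getLast? with _ | ⟨lt, lv⟩ <;>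
    simp [bssState, hE, hL]
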